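-- pv_equiv track=rewrite | github.com/jeremiah-k/meshtastic-python | meshtastic/tests/test_api_baseline_comparison.py | compare_method_baselines
-- ===== SOURCE A (Python) =====
-- def compare_method_baselines(
--     current: dict[str, str],
--     stored: dict[str, str],
--     _class_name: str,
-- ) -> list[str]:
--     """Compare current methods against baseline and report differences.
--
--     Returns a list of human-readable difference descriptions.
--     """
--     differences = []
--
--     current_keys = set(current.keys())
--     stored_keys = set(stored.keys())
--
--     # Find added methods
--     added = current_keys - stored_keys
--     if added:
--         differences.append(f"ADDED methods: {sorted(added)}")
--
--     # Find removed methods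
--     removed = stored_keys - current_keys
--     if removed:
--         differences.append(f"REMOVED methods: {sorted(removed)}")
--
--     # Find changed signatures
--     common = current_keys & stored_keys
--     changed = []
--     for key in sorted(common):
--         if current[key] != stored[key]:
--             changed.append(f"  {key}:")
--             changed.append(f"    stored: {stored[key]}")
--             changed.append(f"    current:  {current[key]}")
--
--     if changed:
--         differences.append("CHANGED signatures:")
--         differences.extend(changed)
--
--     return differences
-- ===== SOURCE B (Python) =====
-- def compare_method_baselines(
--     current: dict[str, str],
--     stored: dict[str, str],
--     _class_name: str,
-- ) -> list[str]:
--     """Single pass over the sorted union of keys, bucketing into added/removed/changed."""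
--     added, removed, changed = [], [], []
--     for key in sorted(set(current) | set(stored)):
--         in_c = key in current
--         in_s = key in stored
--         if in_c and not in_s:
--             added.append(key)
--         elif in_s and not in_c:
--             removed.append(key)
--         elif current[key] != stored[key]:
--             changed.append(f"  {key}:")
--             changed.append(f"    stored: {stored[key]}")
--             changed.append(f"    current:  {current[key]}")
--     differences = []
--     if added:
--         differences.append(f"ADDED methods: {added}")
--     if removed:
--         differences.append(f"REMOVED methods: {removed}")
--     if changed:
--         differences.append("CHANGED signatures:")
--         differences.extend(changed)
--     return differences
-- ===== Notes on version B (the rewrite author's own statement) =====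
-- stated objective: alternative
-- what changed: A computes four separate set operations (difference twice, intersection) and then a dedicated loop over the sorted common keys; B makes one pass over the sorted union of all keys, bucketing each key into added/removed/changed accumulators, then assembles the sections.
import Mathlib
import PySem

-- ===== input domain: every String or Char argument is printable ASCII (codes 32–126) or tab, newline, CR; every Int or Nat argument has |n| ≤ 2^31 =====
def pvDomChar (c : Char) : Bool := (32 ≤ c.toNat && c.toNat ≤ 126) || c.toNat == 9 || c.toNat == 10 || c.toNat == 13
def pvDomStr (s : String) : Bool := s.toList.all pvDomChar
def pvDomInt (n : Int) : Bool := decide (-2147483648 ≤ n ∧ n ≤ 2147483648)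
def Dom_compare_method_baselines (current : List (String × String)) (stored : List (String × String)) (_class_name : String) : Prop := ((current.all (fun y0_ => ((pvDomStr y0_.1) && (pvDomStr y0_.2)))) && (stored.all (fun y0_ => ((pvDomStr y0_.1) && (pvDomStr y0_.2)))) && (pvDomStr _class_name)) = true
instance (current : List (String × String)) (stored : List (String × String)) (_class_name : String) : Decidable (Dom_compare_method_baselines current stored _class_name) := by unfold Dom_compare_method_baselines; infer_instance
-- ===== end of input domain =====

-- B replaces A's four set operations and separate CHANGED loop by ONE pass over the sorted
-- union of the keys that buckets each key into added/removed/changed; same return value.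

-- ===== PORT A =====
-- Python's repr of a str (exact on the domain's characters: printable ASCII, tab, newline, CR),
-- as produced by the f-strings 'f"ADDED methods: {sorted(added)}"' etc.; shared by both ports
-- (both Pythons format a list of strings the same way).
def pyReprChar (q : Char) (c : Char) : List Char :=
  if c = '\\' then ['\\', '\\']
  else if c = q then ['\\', q]
  else if c = '\t' then ['\\', 't']
  else if c = '\n' then ['\\', 'n']
  else if c = '\r' then ['\\', 'r']
  else [c]

def pyStrRepr (s : String) : String :=
  let cs := s.toList
  let q : Char := if cs.contains '\'' && !cs.contains '"' then '"' else '\''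
  String.ofList (q :: (cs.flatMap (pyReprChar q) ++ [q]))

def pyListRepr (xs : List String) : String :=
  "[" ++ String.intercalate ", " (xs.map pyStrRepr) ++ "]"

def compare_method_baselines (current : List (String × String)) (stored : List (String × String)) (_class_name : String) : List String :=
  let curd := PySem.Dict.ofList current
  let stod := PySem.Dict.ofList stored
  let differences : List String := []
  let current_keys : PySem.Set String := PySem.Set.ofList curd.keys
  let stored_keys : PySem.Set String := PySem.Set.ofList stod.keys
  let added := current_keys.diff stored_keys
  let differences := if added.isEmpty then differences else
    differences ++ ["ADDED methods: " ++ pyListRepr (PySem.List.sorted added (fun x => x))]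
  let removed := stored_keys.diff current_keys
  let differences := if removed.isEmpty then differences else
    differences ++ ["REMOVED methods: " ++ pyListRepr (PySem.List.sorted removed (fun x => x))]
  let common := current_keys.inter stored_keys
  let changed := (PySem.List.sorted common (fun x => x)).foldl (fun acc key =>
    if curd.getD key "" ≠ stod.getD key "" then
      acc ++ ["  " ++ key ++ ":", "    stored: " ++ stod.getD key "", "    current:  " ++ curd.getD key ""]
    else acc) []
  if changed.isEmpty then differences else differences ++ ["CHANGED signatures:"] ++ changed

-- ===== PORT B =====
def bucketStep (curd stod : PySem.Dict String String) (st : List String × List String × List String) (key : String) : List String × List String × List String :=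
  if curd.contains key && !stod.contains key then (st.1 ++ [key], st.2.1, st.2.2)
  else if stod.contains key && !curd.contains key then (st.1, st.2.1 ++ [key], st.2.2)
  else if curd.getD key "" ≠ stod.getD key "" then
    (st.1, st.2.1, st.2.2 ++ ["  " ++ key ++ ":", "    stored: " ++ stod.getD key "", "    current:  " ++ curd.getD key ""])
  else st

def compare_method_baselines_alt (current : List (String × String)) (stored : List (String × String)) (_class_name : String) : List String :=
  let curd := PySem.Dict.ofList current
  let stod := PySem.Dict.ofList stored
  let all_keys := PySem.List.sorted ((PySem.Set.ofList curd.keys).union (PySem.Set.ofList stod.keys)) (fun x => x)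
  let st := all_keys.foldl (bucketStep curd stod) ([], [], [])
  let differences : List String := if st.1.isEmpty then [] else ["ADDED methods: " ++ pyListRepr st.1]
  let differences := if st.2.1.isEmpty then differences else differences ++ ["REMOVED methods: " ++ pyListRepr st.2.1]
  if st.2.2.isEmpty then differences else differences ++ ["CHANGED signatures:"] ++ st.2.2

-- ===== PRECONDITION & SPEC =====
def Spec_compare_method_baselines (current : List (String × String)) (stored : List (String × String)) (_class_name : String) (out : List String) : Prop := out = compare_method_baselines_alt current stored _class_name
instance (current : List (String × String)) (stored : List (String × String)) (_class_name : String) (out : List String) : Decidable (Spec_compare_method_baselines current stored _class_name out) := by unfold Spec_compare_method_baselines; infer_instance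

-- ===== CLAIM (what is proved, stated in full; the proofs are below) =====
def Claim_equal_compare_method_baselines : Prop := ∀ (current : List (String × String)) (stored : List (String × String)) (_class_name : String), Dom_compare_method_baselines current stored _class_name → Spec_compare_method_baselines current stored _class_name (compare_method_baselines current stored _class_name)

-- ===== LEMMAS AND PROOFS =====

-- B's bucketing fold, characterised: each accumulator collects the filter of its branch.
lemma bucket_foldl (curd stod : PySem.Dict String String) (l : List String) (a r c : List String) :
    l.foldl (bucketStep curd stod) (a, r, c) =
      (a ++ l.filter (fun k => curd.contains k && !stod.contains k),
       r ++ l.filter (fun k => !(curd.contains k && !stod.contains k) && (stod.contains k && !curd.contains k)),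
       c ++ (l.filter (fun k => !(curd.contains k && !stod.contains k) && !(stod.contains k && !curd.contains k) && decide (curd.getD k "" ≠ stod.getD k ""))).flatMap
            (fun key => ["  " ++ key ++ ":", "    stored: " ++ stod.getD key "", "    current:  " ++ curd.getD key ""])) := by
  induction l generalizing a r c with
  | nil => simp
  | cons x t ih =>
    simp only [List.foldl_cons, bucketStep, List.filter_cons]
    by_cases h1 : (curd.contains x && !stod.contains x) = true
    · simp [h1, ih]
    · by_cases h2 : (stod.contains x && !curd.contains x) = true
      · simp [h1, h2, ih]
      · by_cases h3 : curd.getD x "" ≠ stod.getD x ""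
        · simp [h1, h2, h3, ih]
        · simp [h1, h2, h3, ih]

-- A's CHANGED loop (append three lines when the guard holds) is a flatMap over a filter.
lemma foldl_append_if_list {α β : Type} (p : α → Prop) [DecidablePred p] (g : α → List β) (l : List α) (acc : List β) :
    l.foldl (fun acc x => if p x then acc ++ g x else acc) acc =
      acc ++ (l.filter (fun x => decide (p x))).flatMap g := by
  induction l generalizing acc with
  | nil => simp
  | cons x t ih =>
    by_cases h : p x <;> simp [h, ih]

-- sorted of a subset, as a filter of the sorted superset (both lists of distinct elements).
lemma sorted_eq_filter (xs u : List String) (p : String → Bool) (hx : xs.Nodup) (hu : u.Nodup)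
    (hmem : ∀ k, k ∈ xs ↔ (k ∈ u ∧ p k = true)) :
    PySem.List.sorted xs (fun x => x) = (PySem.List.sorted u (fun x => x)).filter p := by
  apply PySem.List.sorted_eq_of_perm_of_pairwise_lt
  · rw [List.perm_ext_iff_of_nodup (List.Nodup.filter p (((PySem.List.sorted_perm u (fun x => x) false).nodup_iff).mpr hu)) hx]
    intro k
    simp only [List.mem_filter, PySem.List.mem_sorted]
    exact (hmem k).symm
  · exact List.Pairwise.filter p
      (by simpa [PySem.Set.ofList_eq_self_of_nodup u hu] using PySem.List.sorted_ofList_pairwise_lt u)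

-- sorting does not change emptiness
lemma sorted_isEmpty (xs : List String) :
    (PySem.List.sorted xs (fun x => x)).isEmpty = xs.isEmpty := by
  rcases h : PySem.List.sorted xs (fun x => x) with _ | ⟨y, t⟩
  · rw [(PySem.List.sorted_eq_nil_iff xs (fun x => x) false).mp h]
  · have : xs ≠ [] := by
      intro hn; rw [hn] at h; simp [PySem.List.sorted] at h
    simp [this]

-- ===== VERDICT (by name: the statement is the Claim_ definition above) =====
theorem compare_method_baselines_spec : Claim_equal_compare_method_baselines := by
  intro current stored _class_name _hdom
  unfold Spec_compare_method_baselines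
  have hck : (PySem.Dict.ofList current).keys.Nodup := PySem.Dict.nodup_keys_ofList current
  have hsk : (PySem.Dict.ofList stored).keys.Nodup := PySem.Dict.nodup_keys_ofList stored
  simp only [compare_method_baselines, compare_method_baselines_alt, bucket_foldl,
    foldl_append_if_list, List.nil_append,
    PySem.Set.ofList_eq_self_of_nodup _ hck, PySem.Set.ofList_eq_self_of_nodup _ hsk]
  have EqAdd :
      List.filter (fun k => (PySem.Dict.ofList current).contains k && !(PySem.Dict.ofList stored).contains k)
        (PySem.List.sorted (PySem.Set.union (PySem.Dict.ofList current).keys (PySem.Dict.ofList stored).keys) (fun x => x)) =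
      PySem.List.sorted (PySem.Set.diff (PySem.Dict.ofList current).keys (PySem.Dict.ofList stored).keys) (fun x => x) := by
    refine (sorted_eq_filter _ _ _ (PySem.Set.nodup_diff _ _ hck) (PySem.Set.nodup_union _ _ hck) ?_).symm
    intro k
    simp only [PySem.Set.mem_diff, PySem.Set.mem_union, PySem.Dict.contains_eq_decide_mem_keys,
      Bool.and_eq_true, Bool.not_eq_eq_eq_not, Bool.not_true, decide_eq_true_eq, decide_eq_false_iff_not]
    tauto
  have EqRem :
      List.filter (fun k => !((PySem.Dict.ofList current).contains k && !(PySem.Dict.ofList stored).contains k) &&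
          ((PySem.Dict.ofList stored).contains k && !(PySem.Dict.ofList current).contains k))
        (PySem.List.sorted (PySem.Set.union (PySem.Dict.ofList current).keys (PySem.Dict.ofList stored).keys) (fun x => x)) =
      PySem.List.sorted (PySem.Set.diff (PySem.Dict.ofList stored).keys (PySem.Dict.ofList current).keys) (fun x => x) := by
    refine (sorted_eq_filter _ _ _ (PySem.Set.nodup_diff _ _ hsk) (PySem.Set.nodup_union _ _ hck) ?_).symm
    intro k
    simp only [PySem.Set.mem_diff, PySem.Set.mem_union, PySem.Dict.contains_eq_decide_mem_keys,
      Bool.and_eq_true, Bool.not_eq_eq_eq_not, Bool.not_true, decide_eq_true_eq, decide_eq_false_iff_not,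
      Bool.not_and, Bool.or_eq_true, decide_eq_false_iff_not, Bool.not_not]
    tauto
  have EqBoth :
      List.filter (fun k => (PySem.Dict.ofList current).contains k && (PySem.Dict.ofList stored).contains k)
        (PySem.List.sorted (PySem.Set.union (PySem.Dict.ofList current).keys (PySem.Dict.ofList stored).keys) (fun x => x)) =
      PySem.List.sorted (PySem.Set.inter (PySem.Dict.ofList current).keys (PySem.Dict.ofList stored).keys) (fun x => x) := by
    refine (sorted_eq_filter _ _ _ (PySem.Set.nodup_inter _ _ hck) (PySem.Set.nodup_union _ _ hck) ?_).symm
    intro k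
    simp only [PySem.Set.mem_inter, PySem.Set.mem_union, PySem.Dict.contains_eq_decide_mem_keys,
      Bool.and_eq_true, decide_eq_true_eq]
    tauto
  have EqChg :
      List.filter (fun k => !((PySem.Dict.ofList current).contains k && !(PySem.Dict.ofList stored).contains k) &&
            !((PySem.Dict.ofList stored).contains k && !(PySem.Dict.ofList current).contains k) &&
            decide ((PySem.Dict.ofList current).getD k "" ≠ (PySem.Dict.ofList stored).getD k ""))
        (PySem.List.sorted (PySem.Set.union (PySem.Dict.ofList current).keys (PySem.Dict.ofList stored).keys) (fun x => x)) =
      List.filter (fun x => decide ((PySem.Dict.ofList current).getD x "" ≠ (PySem.Dict.ofList stored).getD x ""))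
        (PySem.List.sorted (PySem.Set.inter (PySem.Dict.ofList current).keys (PySem.Dict.ofList stored).keys) (fun x => x)) := by
    rw [← EqBoth, List.filter_filter]
    apply List.filter_congr
    intro k hk
    have hku : k ∈ (PySem.Dict.ofList current).keys ∨ k ∈ (PySem.Dict.ofList stored).keys := by
      have := (PySem.List.mem_sorted _ _ _ k).mp hk
      exact (PySem.Set.mem_union _ _ k).mp this
    by_cases h1 : k ∈ (PySem.Dict.ofList current).keys <;>
      by_cases h2 : k ∈ (PySem.Dict.ofList stored).keys <;>
      (simp [PySem.Dict.contains_eq_decide_mem_keys, h1, h2]; try tauto)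
  rw [EqAdd, EqRem, EqChg, sorted_isEmpty, sorted_isEmpty]
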